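-- pv_equiv track=rewrite | github.com/zeek/zeekctl | BroControl/config.py | _get_pin_cpu_list
-- ===== SOURCE A (Python) =====
-- def _get_pin_cpu_list(text, numprocs):
--     if not text:
--         return []
--
--     cpulist = [int(x) for x in text.split(",")]
--     # Minimum allowed CPU number is zero.
--     if min(cpulist) < 0:
--         raise ValueError
--
--     # Make sure list is at least as long as number of worker processes.
--     cpulen = len(cpulist)
--     if numprocs > cpulen:
--         cpulist = [ cpulist[i % cpulen] for i in range(numprocs) ]
--
--     return cpulist
-- ===== SOURCE B (Python) =====
-- def _get_pin_cpu_list(text, numprocs):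
--     # Different algorithm: instead of indexing element-by-element with i % len,
--     # grow the list by repeated self-concatenation (doubling) until it is long
--     # enough, then truncate -- O(log(numprocs/len)) concatenations.
--     if not text:
--         return []
--
--     cpus = [int(x) for x in text.split(",")]
--     if any(c < 0 for c in cpus):
--         raise ValueError
--
--     if numprocs <= len(cpus):
--         return cpus
--
--     out = cpus
--     while len(out) < numprocs:
--         out = out + out
--     return out[:numprocs]
-- ===== Notes on version B (the rewrite author's own statement) =====
-- stated objective: alternative
-- what changed: The modulo-indexed comprehension over range(numprocs) is replaced by exponential doubling: the list is repeatedly concatenated with itself until its length reaches numprocs, then truncated, so cycling is done in O(log) whole-list concatenations instead of per-element modulo indexing.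
import Mathlib
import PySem

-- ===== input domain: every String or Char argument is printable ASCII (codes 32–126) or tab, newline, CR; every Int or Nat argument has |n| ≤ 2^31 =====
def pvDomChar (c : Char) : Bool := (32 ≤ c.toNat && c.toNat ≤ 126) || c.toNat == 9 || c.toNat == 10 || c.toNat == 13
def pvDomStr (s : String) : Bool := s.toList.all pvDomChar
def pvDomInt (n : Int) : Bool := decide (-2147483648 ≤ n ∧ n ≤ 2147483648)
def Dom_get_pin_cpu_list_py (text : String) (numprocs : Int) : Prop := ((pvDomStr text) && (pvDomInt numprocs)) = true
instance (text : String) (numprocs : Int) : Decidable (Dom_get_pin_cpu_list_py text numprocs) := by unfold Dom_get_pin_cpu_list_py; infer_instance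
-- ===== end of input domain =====

-- B replaces the per-element modulo-indexed cycling by exponential doubling (self-concatenation until long enough, then truncate).

-- shared helper: cpulist = [int(x) for x in text.split(",")]  (identical line in Source A and Source B)
def pvCpuList (text : String) : List Int :=
  ((PySem.Str.split? text ",").getD []).map (fun x => (PySem.Int.ofStr? x).getD 0)

-- ===== PORT A =====
-- the 'raise ValueError' branch (min(cpulist) < 0) is excluded by Pre_ and therefore not ported
def get_pin_cpu_list_py (text : String) (numprocs : Int) : List Int :=
  if text = "" then []
  else
    let cpulist := pvCpuList text
    let cpulen : Int := cpulist.length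
    if numprocs > cpulen then
      (PySem.List.pyRange 0 numprocs 1).map
        (fun i => PySem.List.pyGetD cpulist (PySem.Int.mod i cpulen) 0)
    else cpulist

-- ===== PORT B =====
-- the 'while len(out) < numprocs: out = out + out' loop of Source B
-- (the 'out ≠ []' conjunct is only a totality guard: cpus is never empty there)
def pvDoubleUp (n : Nat) (out : List Int) : List Int :=
  if h : out.length < n ∧ out ≠ [] then pvDoubleUp n (out ++ out) else out
termination_by n - out.length
decreasing_by
  have : 0 < out.length := List.length_pos_iff.mpr h.2
  simp only [List.length_append]
  omega

def get_pin_cpu_list_py_alt (text : String) (numprocs : Int) : List Int :=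
  if text = "" then []
  else
    let cpus := pvCpuList text
    if numprocs ≤ (cpus.length : Int) then cpus
    else PySem.List.slice (pvDoubleUp numprocs.toNat cpus) none (some numprocs)

-- ===== PRECONDITION & SPEC =====
-- Pre_ excludes exactly the inputs on which Python A raises: a token that int() rejects
-- (ValueError) or a parsed CPU number below zero (the explicit raise ValueError).
def Pre_get_pin_cpu_list_py (text : String) (numprocs : Int) : Prop :=
  text = "" ∨ ∀ t ∈ (PySem.Str.split? text ",").getD [],
    (PySem.Int.ofStr? t).isSome ∧ 0 ≤ (PySem.Int.ofStr? t).getD 0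
instance (text : String) (numprocs : Int) : Decidable (Pre_get_pin_cpu_list_py text numprocs) := by unfold Pre_get_pin_cpu_list_py; infer_instance
def pvWitness_get_pin_cpu_list_py : String × Int := ("1,2", 5)
def Spec_get_pin_cpu_list_py (text : String) (numprocs : Int) (out : List Int) : Prop := out = get_pin_cpu_list_py_alt text numprocs
instance (text : String) (numprocs : Int) (out : List Int) : Decidable (Spec_get_pin_cpu_list_py text numprocs out) := by unfold Spec_get_pin_cpu_list_py; infer_instance

-- ===== CLAIM (what is proved, stated in full; the proofs are below) =====
def Claim_equal_get_pin_cpu_list_py : Prop := ∀ (text : String) (numprocs : Int), Dom_get_pin_cpu_list_py text numprocs → Pre_get_pin_cpu_list_py text numprocs → Spec_get_pin_cpu_list_py text numprocs (get_pin_cpu_list_py text numprocs)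

-- ===== LEMMAS AND PROOFS =====

-- splitOn.go never returns []
theorem pv_splitOn_go_ne_nil (sep : List Char) :
    ∀ (fuel : Nat) (l cur : List Char) (acc : List (List Char)),
      PySem.Chars.splitOn.go sep fuel l cur acc ≠ [] := by
  intro fuel
  induction fuel with
  | zero =>
    intro l cur acc
    unfold PySem.Chars.splitOn.go
    simp
  | succ n ih =>
    intro l cur acc
    unfold PySem.Chars.splitOn.go
    cases l with
    | nil => simp
    | cons c rest =>
      by_cases h : sep.isPrefixOf (c :: rest) = true
      · simpa [h] using ih _ _ _
      · simpa [h] using ih _ _ _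

theorem pv_cpuList_ne_nil (text : String) : pvCpuList text ≠ [] := by
  unfold pvCpuList
  have h := PySem.Str.split?_map text ","
  cases hs : PySem.Str.split? text "," with
  | none =>
    rw [hs] at h
    simp [PySem.Chars.split?] at h
  | some xs =>
    rw [hs] at h
    simp [PySem.Chars.split?, PySem.Chars.splitOn] at h
    cases xs with
    | nil => simp at h; exact ((pv_splitOn_go_ne_nil [','] _ _ [] [] h).elim)
    | cons a l => simp

-- [L.getD k 0 for k in range n] = take n L  when n ≤ |L|
theorem pv_map_range_getD (L : List Int) (n : Nat) (h : n ≤ L.length) :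
    (List.range n).map (fun k => L.getD k 0) = L.take n := by
  apply List.ext_getElem
  · simp [h]
  · intro i h1 h2
    have hi : i < L.length := by simp at h2; omega
    simp only [List.getElem_map, List.getElem_range, List.getElem_take]
    exact List.getD_eq_getElem L 0 hi

-- the cycling comprehension equals take n of any sufficiently long replication
theorem pv_cycle_eq_take (L : List Int) (hl : 0 < L.length) :
    ∀ (m n : Nat), n ≤ m * L.length →
      (List.range n).map (fun k => L.getD (k % L.length) 0)
        = ((List.replicate m L).flatten).take n := by
  intro m
  induction m with
  | zero =>
    intro n hn
    simp at hn
    simp [hn]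
  | succ m ih =>
    intro n hn
    rw [List.replicate_succ, List.flatten_cons]
    by_cases h : n ≤ L.length
    · rw [List.take_append]
      have hnl : n - L.length = 0 := by omega
      rw [hnl]
      simp only [List.take_zero, List.append_nil]
      have hcg : (List.range n).map (fun k => L.getD (k % L.length) 0)
          = (List.range n).map (fun k => L.getD k 0) := by
        apply List.map_congr_left
        intro k hk
        simp at hk
        rw [Nat.mod_eq_of_lt (by omega)]
      rw [hcg, pv_map_range_getD L n h]
    · have hn' : n = L.length + (n - L.length) := by omega
      have h1 : (List.range L.length).map (fun k => L.getD (k % L.length) 0) = L := by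
        have ht := pv_map_range_getD L L.length (le_refl _)
        rw [List.take_length] at ht
        have hcg2 : (List.range L.length).map (fun k => L.getD (k % L.length) 0)
            = (List.range L.length).map (fun k => L.getD k 0) := by
          apply List.map_congr_left
          intro k hk
          simp at hk
          rw [Nat.mod_eq_of_lt hk]
        rw [hcg2, ht]
      have hsplit : (List.range n).map (fun k => L.getD (k % L.length) 0)
          = (List.range L.length).map (fun k => L.getD (k % L.length) 0)
            ++ (List.range (n - L.length)).map (fun k => L.getD ((L.length + k) % L.length) 0) := by
        conv_lhs => rw [hn']
        rw [List.range_add, List.map_append, List.map_map]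
        rfl
      have hshift : (List.range (n - L.length)).map (fun k => L.getD ((L.length + k) % L.length) 0)
          = (List.range (n - L.length)).map (fun k => L.getD (k % L.length) 0) := by
        apply List.map_congr_left
        intro k _
        rw [Nat.add_mod_left]
      have hih : (List.range (n - L.length)).map (fun k => L.getD (k % L.length) 0)
          = ((List.replicate m L).flatten).take (n - L.length) := by
        apply ih
        have := hn
        rw [Nat.succ_mul] at this
        omega
      rw [List.take_append, List.take_of_length_le (by omega), hsplit, hshift, h1, hih]

-- doubling a replication of L yields a longer replication of L
theorem pv_double_flatten (L : List Int) (hL : L ≠ []) (n : Nat) :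
    ∀ (out : List Int), (∃ m, 0 < m ∧ out = (List.replicate m L).flatten) →
      ∃ k, pvDoubleUp n out = (List.replicate k L).flatten ∧ n ≤ k * L.length := by
  intro out
  induction out using pvDoubleUp.induct (n := n) with
  | case1 out h ih =>
    rintro ⟨m, hm, hout⟩
    have hdbl : out ++ out = (List.replicate (2 * m) L).flatten := by
      rw [hout, two_mul, List.replicate_add, List.flatten_append]
    obtain ⟨k, hk1, hk2⟩ := ih ⟨2 * m, by omega, hdbl⟩
    refine ⟨k, ?_, hk2⟩
    rw [pvDoubleUp, dif_pos h]
    exact hk1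
  | case2 out h =>
    rintro ⟨m, hm, hout⟩
    have hl2 : 0 < L.length := List.length_pos_iff.mpr hL
    have hlen0 : out.length = m * L.length := by
      rw [hout]; simp [List.length_flatten, List.map_replicate]
    have hne : out ≠ [] := by
      intro hc
      rw [hc] at hlen0
      rcases Nat.mul_eq_zero.mp hlen0.symm with h1 | h1 <;> omega
    have hlen : n ≤ out.length := by
      by_contra hc
      exact h ⟨by omega, hne⟩
    exact ⟨m, by rw [pvDoubleUp, dif_neg h]; exact hout, by omega⟩

-- ===== VERDICT (by name: the statement is the Claim_ definition above) =====
theorem get_pin_cpu_list_py_spec : Claim_equal_get_pin_cpu_list_py := by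
  intro text numprocs _ _
  unfold Spec_get_pin_cpu_list_py get_pin_cpu_list_py get_pin_cpu_list_py_alt
  by_cases ht : text = ""
  · simp [ht]
  · simp only [ht, if_false]
    set L := pvCpuList text with hLdef
    have hL : L ≠ [] := pv_cpuList_ne_nil text
    have hl : 0 < L.length := List.length_pos_iff.mpr hL
    by_cases hn : numprocs > (L.length : Int)
    · rw [if_pos hn, if_neg (by omega)]
      have hnp : 0 < numprocs := by
        have : (0 : Int) < (L.length : Int) := by exact_mod_cast hl
        omega
      obtain ⟨k, hk1, hk2⟩ :=
        pv_double_flatten L hL numprocs.toNat L ⟨1, by omega, by simp⟩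
      rw [PySem.List.slice_to _ (le_of_lt hnp), hk1,
        ← pv_cycle_eq_take L hl k numprocs.toNat hk2]
      have hrange : PySem.List.pyRange 0 numprocs 1
          = (List.range numprocs.toNat).map (fun (kk : Nat) => (kk : Int)) := by
        have hcast : numprocs = ((numprocs.toNat : Nat) : Int) :=
          (Int.toNat_of_nonneg (le_of_lt hnp)).symm
        rw [hcast]
        exact PySem.List.pyRange_zero_nat numprocs.toNat
      rw [hrange, List.map_map]
      apply List.map_congr_left
      intro kk _
      simp only [Function.comp_apply]
      rw [PySem.Int.mod_natCast, PySem.List.pyGetD_natCast]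
    · rw [if_neg hn, if_pos (by omega)]
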